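-- pv_equiv track=rewrite | github.com/nairraghav/coding-practice | hackerrank/hack-the-interview-ii/maximal_char_requests.py | get_max_char_count
-- ===== SOURCE A (Python) =====
-- def get_max_char_count(s, x, y):
--     current_char = s[x].lower()
--     char_count = {current_char:1}
--     for index in range(x+1, y+1):
--         new_char = s[index].lower()
--         if current_char < new_char:
--             current_char = new_char
--         if new_char in char_count:
--             char_count[new_char] += 1
--         else:
--             char_count[new_char] = 1
--     return char_count[current_char]
-- ===== SOURCE B (Python) =====
-- def get_max_char_count(s, x, y):
--     chars = [s[i].lower() for i in range(x, y + 1)]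
--     for code in range(127, -1, -1):
--         occurrences = chars.count(chr(code))
--         if occurrences:
--             return occurrences
-- ===== Notes on version B (the rewrite author's own statement) =====
-- stated objective: alternative
-- what changed: Instead of A's fused data pass that tracks a running max while building a frequency dict, B gathers the lowered range characters and then scans the fixed ASCII alphabet downward (codes 127..0), returning the count of the first character code that occurs - no max() over the data and no dict.
-- outside the precondition, e.g. on get_max_char_count('ab', 1, 0): A returns 1, B returns None
import Mathlib
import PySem

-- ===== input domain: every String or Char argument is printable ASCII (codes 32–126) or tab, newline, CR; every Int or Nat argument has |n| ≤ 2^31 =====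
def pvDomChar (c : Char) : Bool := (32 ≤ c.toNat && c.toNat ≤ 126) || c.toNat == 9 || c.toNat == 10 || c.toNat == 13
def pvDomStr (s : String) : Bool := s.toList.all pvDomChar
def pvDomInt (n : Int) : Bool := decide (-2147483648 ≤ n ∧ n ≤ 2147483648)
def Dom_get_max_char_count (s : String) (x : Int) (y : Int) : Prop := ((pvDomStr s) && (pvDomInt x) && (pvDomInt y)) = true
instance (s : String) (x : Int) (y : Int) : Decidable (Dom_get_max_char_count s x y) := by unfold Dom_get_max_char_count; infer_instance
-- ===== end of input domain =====

-- B replaces A's fused running-max + frequency-dict data pass by a descending scan over the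
-- fixed ASCII alphabet (codes 127..0), returning the count of the first code that occurs;
-- objective: alternative (no max over the data, no dict).

-- ===== PORT A =====
-- A's loop state: (current_char, char_count); s[index] is PySem.Str.pyGet? (none = IndexError,
-- excluded by Pre_; the port returns the untouched state / 0 there, which the claim never reaches).
def get_max_char_count (s : String) (x : Int) (y : Int) : Int :=
  match PySem.Str.pyGet? s x with
  | none => 0
  | some c0 =>
    let currentChar := PySem.Chars.lowerChar c0
    let charCount : PySem.Dict Char Int := (PySem.Dict.empty).insert currentChar 1
    let st := (PySem.List.pyRange (x + 1) (y + 1) 1).foldl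
      (fun (st : Char × PySem.Dict Char Int) index =>
        match PySem.Str.pyGet? s index with
        | none => st
        | some c =>
          let newChar := PySem.Chars.lowerChar c
          let cur := if st.1 < newChar then newChar else st.1
          let d := if st.2.contains newChar
                   then st.2.insert newChar (st.2.getD newChar 0 + 1)
                   else st.2.insert newChar 1
          (cur, d))
      (currentChar, charCount)
    st.2.getD st.1 0

-- ===== PORT B =====
-- B's 'for code in range(127, -1, -1): occurrences = chars.count(chr(code)); if occurrences: return occurrences'
-- (falling off the loop returns None in Python — excluded by Pre_; the port returns 0 there).
def pvScanB (chars : List Char) : List Int → Int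
  | [] => 0
  | code :: rest =>
    let occurrences : Nat := PySem.List.count chars (Char.ofNat code.toNat)
    if occurrences ≠ 0 then (occurrences : Int) else pvScanB chars rest

-- B's one-character strings s[i].lower() are ported as Chars (comparison/count agree on ASCII);
-- out-of-range s[i] (IndexError) is excluded by Pre_.
def get_max_char_count_alt (s : String) (x : Int) (y : Int) : Int :=
  let chars := (PySem.List.pyRange x (y + 1) 1).map
    (fun i => PySem.Chars.lowerChar ((PySem.Str.pyGet? s i).getD ' '))
  pvScanB chars (PySem.List.pyRange 127 (-1) (-1))

-- ===== PRECONDITION & SPEC =====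
-- Pre_ excludes (a) indices out of Python's range, where A raises IndexError, and
-- (b) empty ranges x > y, where A returns 1 (the count of s[x] alone) but B's alphabet loop
-- finds no character in the empty gathered list and falls off, returning None (not an int).
def Pre_get_max_char_count (s : String) (x : Int) (y : Int) : Prop :=
  x ≤ y ∧ PySem.Raise.InRange s.toList.length x ∧ PySem.Raise.InRange s.toList.length y
instance (s : String) (x : Int) (y : Int) : Decidable (Pre_get_max_char_count s x y) := by
  unfold Pre_get_max_char_count; infer_instance
def pvWitness_get_max_char_count : String × Int × Int := ("aBba c", -5, 4)
def Spec_get_max_char_count (s : String) (x : Int) (y : Int) (out : Int) : Prop := out = get_max_char_count_alt s x y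
instance (s : String) (x : Int) (y : Int) (out : Int) : Decidable (Spec_get_max_char_count s x y out) := by unfold Spec_get_max_char_count; infer_instance

-- ===== CLAIM (what is proved, stated in full; the proofs are below) =====
def Claim_equal_get_max_char_count : Prop := ∀ (s : String) (x : Int) (y : Int), Dom_get_max_char_count s x y → Pre_get_max_char_count s x y → Spec_get_max_char_count s x y (get_max_char_count s x y)

-- ===== LEMMAS AND PROOFS =====

-- the lowered character B gathers at index i (total form; equals A's s[index].lower() wherever in range)
def pvLow (s : String) (i : Int) : Char :=
  PySem.Chars.lowerChar ((PySem.Str.pyGet? s i).getD ' ')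

lemma pvCharOfNat_toNat (k : Nat) (h : k < 55296) : (Char.ofNat k).toNat = k := by
  have hv : k.isValidChar := Or.inl h
  simp [Char.ofNat, hv, Char.ofNatAux, Char.toNat]

lemma pvCharEq_of_toNat (a b : Char) (h : a.toNat = b.toNat) : a = b := by
  apply Char.ext; exact UInt32.toNat_inj.mp h

lemma pvToNat_le_of_le (a b : Char) (h : a ≤ b) : a.toNat ≤ b.toNat := by
  rw [Char.le_def] at h; exact UInt32.le_iff_toNat_le.mp h

-- every character B gathers has code ≤ 127 when s is in the ASCII domain
lemma pvLow_le (s : String) (hs : pvDomStr s = true) (i : Int) : (pvLow s i).toNat ≤ 127 := by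
  unfold pvLow
  have hbound : ∀ c : Char, c.toNat ≤ 126 → (PySem.Chars.lowerChar c).toNat ≤ 127 := by
    intro c hc
    unfold PySem.Chars.lowerChar
    by_cases hu : PySem.Chars.isupper c = true
    · have hle : c.toNat ≤ 90 := by
        simp only [PySem.Chars.isupper, Bool.and_eq_true, decide_eq_true_eq] at hu
        have := pvToNat_le_of_le c 'Z' hu.2
        simpa using this
      rw [if_pos hu, pvCharOfNat_toNat _ (by omega)]; omega
    · rw [if_neg hu]; omega
  cases h : PySem.Str.pyGet? s i with
  | none => simp only [Option.getD_none]; exact hbound ' ' (by decide)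
  | some c =>
    simp only [Option.getD_some]
    apply hbound
    have hmem : c ∈ s.toList := by
      apply PySem.List.mem_of_pyGet?_eq_some s.toList
      simpa [PySem.Str.pyGet?, PySem.Chars.pyGet?] using h
    have := List.all_eq_true.mp hs c hmem
    simp only [pvDomChar, Bool.or_eq_true, Bool.and_eq_true, decide_eq_true_eq, beq_iff_eq] at this
    omega

-- the descending alphabet scan of B returns the count of the maximal element
lemma pvScan_spec (chars : List Char) (m : Char) (hm : m ∈ chars)
    (hmax : ∀ c ∈ chars, c ≤ m) :
    ∀ n : Nat, m.toNat ≤ n → n ≤ 127 →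
      pvScanB chars (PySem.List.pyRange (n : Int) (-1) (-1)) = (List.count m chars : Int) := by
  intro n
  induction n with
  | zero =>
    intro h0 _
    simp only [Nat.cast_zero]
    rw [PySem.List.pyRange_neg_one_cons (by omega), PySem.List.pyRange_neg_one_eq_nil (by omega)]
    have hmc : Char.ofNat (0 : Int).toNat = m := by
      apply pvCharEq_of_toNat
      rw [pvCharOfNat_toNat _ (by omega)]; omega
    unfold pvScanB
    rw [hmc, PySem.List.count_eq]
    rw [if_pos (by simpa using (List.count_pos_iff.mpr hm).ne')]
  | succ k ih =>
    intro hle h127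
    simp only [Nat.cast_add, Nat.cast_one]
    rw [PySem.List.pyRange_neg_one_cons (by omega)]
    unfold pvScanB
    have htn : (Char.ofNat ((k : Int) + 1).toNat).toNat = k + 1 := by
      have : ((k : Int) + 1).toNat = k + 1 := by omega
      rw [this, pvCharOfNat_toNat _ (by omega)]
    by_cases hc : PySem.List.count chars (Char.ofNat ((k : Int) + 1).toNat) = 0
    · rw [if_neg (by simpa using hc)]
      have hnm : Char.ofNat ((k : Int) + 1).toNat ≠ m := by
        intro he
        rw [PySem.List.count_eq, he] at hc
        exact (List.count_pos_iff.mpr hm).ne' hc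
      have hlt : m.toNat ≤ k := by
        rcases Nat.lt_or_ge m.toNat (k + 1) with h | h
        · omega
        · exact absurd (pvCharEq_of_toNat _ _ (by omega)) hnm
      have hcast : (k : Int) + 1 - 1 = ((k : Nat) : Int) := by omega
      rw [hcast]
      exact ih hlt (by omega)
    · rw [if_pos (by simpa using hc)]
      have hmem : Char.ofNat ((k : Int) + 1).toNat ∈ chars := by
        rw [PySem.List.count_eq] at hc
        exact List.count_pos_iff.mp (Nat.pos_of_ne_zero hc)
      have hle' : (Char.ofNat ((k : Int) + 1).toNat).toNat ≤ m.toNat :=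
        pvToNat_le_of_le _ _ (hmax _ hmem)
      have heq : Char.ofNat ((k : Int) + 1).toNat = m := by
        apply pvCharEq_of_toNat; omega
      rw [heq, PySem.List.count_eq]

-- A's dict-update branch is exactly the unconditional "insert with getD + 1"
lemma pvDictStep (d : PySem.Dict Char Int) (c : Char) :
    (if d.contains c then d.insert c (d.getD c 0 + 1) else d.insert c 1)
      = d.insert c (d.getD c 0 + 1) := by
  by_cases h : d.contains c
  · simp [h]
  · rw [if_neg (by simpa using h),
        PySem.Dict.getD_of_not_contains d (0 : Int) (by simpa using h)]
    norm_num

-- A's fused loop over the index range splits into an independent running max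
-- and a count dict over the gathered lowered characters
lemma pvLoopSplit (s : String) (l : List Int) (m : Char) (d : PySem.Dict Char Int) :
    l.foldl (fun (st : Char × PySem.Dict Char Int) i =>
        (if st.1 < pvLow s i then pvLow s i else st.1,
         st.2.insert (pvLow s i) (st.2.getD (pvLow s i) 0 + 1))) (m, d)
      = ((l.map (pvLow s)).foldl max m,
         (l.map (pvLow s)).foldl (fun d c => d.insert c (d.getD c 0 + 1)) d) := by
  induction l generalizing m d with
  | nil => rfl
  | cons i l ih =>
      simp only [List.foldl_cons, List.map_cons, ih]
      congr 1
      rcases lt_or_ge m (pvLow s i) with h | h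
      · simp [h, max_eq_right h.le]
      · simp [not_lt.mpr h, max_eq_left h]

-- ===== VERDICT (by name: the statement is the Claim_ definition above) =====
theorem get_max_char_count_spec : Claim_equal_get_max_char_count := by
  intro s x y hdom hpre
  rcases hpre with ⟨hxy, hx, hy⟩
  have hs : pvDomStr s = true := by
    unfold Dom_get_max_char_count at hdom
    simp only [Bool.and_eq_true] at hdom
    exact hdom.1.1
  unfold PySem.Raise.InRange at hx hy
  unfold Spec_get_max_char_count get_max_char_count get_max_char_count_alt
  -- every index in [x, y] is in Python's range for s
  have hget : ∀ i : Int, x ≤ i → i ≤ y → ∃ c, PySem.List.pyGet? s.toList i = some c := by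
    intro i h1 h2
    cases hc : PySem.List.pyGet? s.toList i with
    | some c => exact ⟨c, rfl⟩
    | none =>
      exact absurd ((PySem.List.pyGet?_eq_none_iff s.toList i).mp hc)
        (by unfold PySem.Raise.InRange; simp only [not_not]; omega)
  obtain ⟨c0, hc0⟩ := hget x le_rfl hxy
  have hc0' : PySem.Str.pyGet? s x = some c0 := by
    simp [PySem.Str.pyGet?, PySem.Chars.pyGet?, hc0]
  -- name B's gathering function: it is pvLow
  have hfun : (fun i => PySem.Chars.lowerChar ((PySem.Str.pyGet? s i).getD ' ')) = pvLow s := rfl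
  rw [hc0', hfun]
  -- B's gathered list is pvLow s x :: the mapped tail over range(x+1, y+1)
  rw [PySem.List.pyRange_one_cons (a := x) (b := y + 1) (by omega)]
  simp only [List.map_cons]
  -- rewrite A's loop body: the pyGet? match is total on the range and equals the pvLow step
  rw [PySem.List.foldl_congr_mem _ _
      (fun (st : Char × PySem.Dict Char Int) i =>
        (if st.1 < pvLow s i then pvLow s i else st.1,
         st.2.insert (pvLow s i) (st.2.getD (pvLow s i) 0 + 1))) _
      (by
        intro st i hi
        have hmem := (PySem.List.mem_pyRange_one (a := x + 1) (b := y + 1) (x := i)).mp hi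
        obtain ⟨c, hc⟩ := hget i (by omega) (by omega)
        simp only [PySem.Str.pyGet?, PySem.Chars.pyGet?, hc, pvLow, pvDictStep, Option.getD_some])]
  rw [pvLoopSplit]
  dsimp only
  have hx0 : pvLow s x = PySem.Chars.lowerChar c0 := by
    simp [pvLow, PySem.Str.pyGet?, PySem.Chars.pyGet?, hc0]
  rw [← hx0]
  set t := List.map (pvLow s) (PySem.List.pyRange (x + 1) (y + 1) 1) with ht
  set m := t.foldl max (pvLow s x) with hm
  -- m is the maximum of the gathered list
  have hmmem : m ∈ pvLow s x :: t := by
    rcases PySem.List.foldl_max_mem t (pvLow s x) with h | h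
    · rw [hm, h]; exact List.mem_cons_self
    · exact List.mem_cons_of_mem _ h
  have hmmax : ∀ c ∈ pvLow s x :: t, c ≤ m := by
    intro c hc
    rcases List.mem_cons.mp hc with h | h
    · rw [h]; exact (PySem.List.le_foldl_max t (pvLow s x)).1
    · exact (PySem.List.le_foldl_max t (pvLow s x)).2 c h
  have hmle : m.toNat ≤ 127 := by
    rcases List.mem_cons.mp hmmem with h | h
    · rw [h]; exact pvLow_le s hs x
    · rcases List.mem_map.mp (ht ▸ h) with ⟨i, _, hi⟩
      rw [← hi]; exact pvLow_le s hs i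
  -- B side: the alphabet scan returns the count of m
  have h127 : (127 : Int) = ((127 : Nat) : Int) := by norm_num
  rw [h127, pvScan_spec (pvLow s x :: t) m hmmem hmmax 127 hmle le_rfl]
  -- A side: the count dict looked up at m is the count of m
  rw [PySem.Dict.getD_foldl_insert_add_one]
  rw [List.count_cons]
  by_cases h : pvLow s x = m
  · rw [h, PySem.Dict.getD_insert_self]
    simp [Int.add_comm]
  · rw [PySem.Dict.getD_insert_of_ne _ _ _ (Ne.symm h), PySem.Dict.getD_empty]
    simp [beq_iff_eq, h]
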